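-- pv_equiv track=rewrite | github.com/spbupos/sudoku-solver | solver.py | fail_in_row
-- ===== SOURCE A (Python) =====
-- def fail_in_row(row, sudoku):
--     r = []
--     for c in range(9):
--         if sudoku[row][c] == 0:
--             continue
--         if not sudoku[row][c] in r:
--             r.append(sudoku[row][c])
--         else:
--             return True
--     return False
-- ===== SOURCE B (Python) =====
-- def fail_in_row(row, sudoku):
--     vals = sorted(v for v in sudoku[row][:9] if v != 0)
--     return any(a == b for a, b in zip(vals, vals[1:]))
-- ===== Notes on version B (the rewrite author's own statement) =====
-- stated objective: alternative
-- what changed: Replaces A's incremental seen-list membership loop with early return by a sort-based detector: collect the nonzero cells of the first nine, sort them, and report a duplicate iff some adjacent pair of the sorted list is equal.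
import Mathlib
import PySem

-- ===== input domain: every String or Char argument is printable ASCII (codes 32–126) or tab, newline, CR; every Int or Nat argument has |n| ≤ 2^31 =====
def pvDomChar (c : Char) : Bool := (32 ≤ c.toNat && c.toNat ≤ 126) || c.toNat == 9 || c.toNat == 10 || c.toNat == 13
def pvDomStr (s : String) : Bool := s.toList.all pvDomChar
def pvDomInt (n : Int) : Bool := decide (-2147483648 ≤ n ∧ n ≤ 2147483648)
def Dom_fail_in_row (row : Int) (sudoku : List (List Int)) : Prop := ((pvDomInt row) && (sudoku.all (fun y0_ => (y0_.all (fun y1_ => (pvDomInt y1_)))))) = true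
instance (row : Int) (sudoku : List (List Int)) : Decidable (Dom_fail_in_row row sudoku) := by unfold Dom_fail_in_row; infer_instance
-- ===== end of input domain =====

-- B detects a duplicate by sorting the nonzero cells and scanning adjacent pairs, instead of A's
-- incremental seen-list membership loop with early return; objective: alternative (sort-based
-- detector of similar cost). Pre_ excludes rows on which A raises IndexError (short rows with
-- no early duplicate) and out-of-range row indices.


-- ===== PORT A =====
-- A's loop: for c in range(9): skip zeros, return True on the first repeat, else append to r.
def failInRowLoopA (rw : List Int) : List Int → List Int → Bool
  | [], _r => false
  | c :: cs, r =>
    let v := PySem.List.pyGetD rw c 0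
    if v = 0 then failInRowLoopA rw cs r
    else if v ∈ r then true
    else failInRowLoopA rw cs (r ++ [v])

def fail_in_row (row : Int) (sudoku : List (List Int)) : Bool :=
  failInRowLoopA (PySem.List.pyGetD sudoku row []) (PySem.List.pyRange 0 9 1) []

-- ===== PORT B =====
-- vals = sorted(v for v in sudoku[row][:9] if v != 0); return any(a == b for a, b in zip(vals, vals[1:]))
def fail_in_row_alt (row : Int) (sudoku : List (List Int)) : Bool :=
  let rw := PySem.List.pyGetD sudoku row []
  let vals := PySem.List.sorted ((PySem.List.slice rw none (some 9)).filter (fun v => !(v == 0))) (fun v => v) false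
  (vals.zip (PySem.List.slice vals (some 1) none)).any (fun p => p.1 == p.2)

-- ===== PRECONDITION & SPEC =====
-- Pre_ is exactly where A returns normally: the row index in range, and either the selected row
-- has at least 9 cells or its nonzero values already repeat (then A early-returns True before
-- reaching the missing index).
def Pre_fail_in_row (row : Int) (sudoku : List (List Int)) : Prop :=
  PySem.Raise.InRange sudoku.length row ∧
    (9 ≤ (PySem.List.pyGetD sudoku row []).length ∨
      ¬ ((PySem.List.pyGetD sudoku row []).filter (fun v => !(v == 0))).Nodup)
instance (row : Int) (sudoku : List (List Int)) : Decidable (Pre_fail_in_row row sudoku) := by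
  unfold Pre_fail_in_row; infer_instance

def pvWitness_fail_in_row : Int × List (List Int) :=
  (0, [[5, 3, 0, 0, 7, 0, 0, 0, 5]])

def Spec_fail_in_row (row : Int) (sudoku : List (List Int)) (out : Bool) : Prop := out = fail_in_row_alt row sudoku
instance (row : Int) (sudoku : List (List Int)) (out : Bool) : Decidable (Spec_fail_in_row row sudoku out) := by unfold Spec_fail_in_row; infer_instance

-- ===== CLAIM (what is proved, stated in full; the proofs are below) =====
def Claim_equal_fail_in_row : Prop := ∀ (row : Int) (sudoku : List (List Int)), Dom_fail_in_row row sudoku → Pre_fail_in_row row sudoku → Spec_fail_in_row row sudoku (fail_in_row row sudoku)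

-- ===== LEMMAS AND PROOFS =====

-- A's loop seen on the list of fetched values instead of the index list.
def failInRowLoopV : List Int → List Int → Bool
  | [], _r => false
  | v :: vs, r =>
    if v = 0 then failInRowLoopV vs r
    else if v ∈ r then true
    else failInRowLoopV vs (r ++ [v])

lemma loopA_eq_loopV (rw : List Int) :
    ∀ (idxs r : List Int),
      failInRowLoopA rw idxs r = failInRowLoopV (idxs.map (fun c => PySem.List.pyGetD rw c 0)) r := by
  intro idxs
  induction idxs with
  | nil => intro r; rfl
  | cons c cs ih =>
      intro r
      simp only [failInRowLoopA, failInRowLoopV, List.map]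
      split_ifs <;> simp [ih]

-- the 9 fetched values are the first 9 cells padded with zeros
lemma map_getD_range (rw : List Int) :
    ∀ (n : Nat), (List.range n).map (fun k => rw.getD k 0)
      = rw.take n ++ List.replicate (n - rw.length) 0 := by
  intro n
  induction n with
  | zero => simp
  | succ n ih =>
      rw [List.range_succ, List.map_append, ih]
      simp only [List.map_cons, List.map_nil]
      by_cases h : n < rw.length
      · have h1 : n + 1 - rw.length = 0 := by omega
        have h0 : n - rw.length = 0 := by omega
        rw [h1, h0, List.replicate_zero, List.append_nil, List.append_nil,
          List.getD_eq_getElem rw 0 h, List.take_add_one, List.getElem?_eq_getElem h]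
        rfl
      · have hle : rw.length ≤ n := by omega
        have h1 : n + 1 - rw.length = (n - rw.length) + 1 := by omega
        rw [List.take_of_length_le hle, List.take_of_length_le (by omega), h1,
          List.replicate_succ']
        have hd : rw.getD n 0 = 0 := by
          simp [List.getD_eq_getElem?_getD, List.getElem?_eq_none hle]
        rw [hd, List.append_assoc]

lemma loopV_false_iff :
    ∀ (vs r : List Int), r.Nodup →
      (failInRowLoopV vs r = false ↔ (r ++ vs.filter (fun v => !(v == 0))).Nodup) := by
  intro vs
  induction vs with
  | nil => intro r hr; simpa [failInRowLoopV] using hr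
  | cons v vs ih =>
      intro r hr
      by_cases h0 : v = 0
      · simpa [failInRowLoopV, h0] using ih r hr
      · by_cases hmem : v ∈ r
        · have hnot : ¬ (r ++ (v :: vs).filter (fun v => !(v == 0))).Nodup := by
            intro hn
            rw [List.nodup_append] at hn
            exact hn.2.2 v hmem v (by simp [h0]) rfl
          simp [h0] at hnot
          simp [failInRowLoopV, h0, hmem, hnot]
        · have hr' : (r ++ [v]).Nodup := by
            rw [List.nodup_append]
            refine ⟨hr, List.nodup_singleton v, ?_⟩
            intro a ha b hb
            simp only [List.mem_singleton] at hb
            subst hb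
            exact fun h => hmem (h ▸ ha)
          have := ih (r ++ [v]) hr'
          simp only [failInRowLoopV, if_neg h0, if_neg hmem]
          rw [this]
          simp [h0, List.append_assoc]

-- a ≤-sorted list has an equal adjacent pair iff it is not Nodup
lemma adj_any_sorted :
    ∀ (s : List Int), s.Pairwise (· ≤ ·) →
      (((s.zip s.tail).any (fun p => p.1 == p.2)) = true ↔ ¬ s.Nodup) := by
  intro s
  induction s with
  | nil => intro _; simp
  | cons a t ih =>
      intro hp
      cases t with
      | nil => simp
      | cons b u =>
          have hab : a ≤ b := (List.pairwise_cons.mp hp).1 b (by simp)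
          have hpt : (b :: u).Pairwise (· ≤ ·) := (List.pairwise_cons.mp hp).2
          by_cases hEq : a = b
          · subst hEq
            simp [List.zip, List.any_cons]
          · have hlt : a < b := lt_of_le_of_ne hab hEq
            have hnotmem : a ∉ b :: u := by
              intro hm
              rcases List.mem_cons.mp hm with h | h
              · exact hEq h
              · have hbx : b ≤ a := (List.pairwise_cons.mp hpt).1 a h
                omega
            have hthis := ih hpt
            simp only [List.tail_cons] at hthis
            have hbeq : (a == b) = false := by simp [hEq]
            simp only [List.tail_cons, List.zip_cons_cons, List.any_cons, hbeq, Bool.false_or]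
            rw [hthis]
            constructor
            · intro hnd hc; exact hnd (List.nodup_cons.mp hc).2
            · intro hnd hc; exact hnd (List.nodup_cons.mpr ⟨hnotmem, hc⟩)

-- the 9 index fetches, as a plain map over List.range 9
lemma map_pyRange9 (rw : List Int) :
    (PySem.List.pyRange 0 9 1).map (fun c => PySem.List.pyGetD rw c 0)
      = (List.range 9).map (fun k => rw.getD k 0) := by
  have h : ((9 : Nat) : Int) = (9 : Int) := by norm_num
  rw [← h, PySem.List.pyRange_zero_natCast, List.map_map]
  apply List.map_congr_left
  intro k _
  simp [PySem.List.pyGetD_natCast]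

lemma slice9 (rw : List Int) : PySem.List.slice rw none (some 9) = rw.take 9 := by
  rw [PySem.List.slice_to]
  · rfl
  · norm_num

-- the two ports agree on ALL inputs (the proof below does not even need Pre_)
lemma ports_agree (row : Int) (sudoku : List (List Int)) :
    fail_in_row row sudoku = fail_in_row_alt row sudoku := by
  unfold fail_in_row fail_in_row_alt
  set rw := PySem.List.pyGetD sudoku row [] with hrw
  rw [loopA_eq_loopV, map_pyRange9, map_getD_range]
  set vals0 := (PySem.List.slice rw none (some 9)).filter (fun v => !(v == 0)) with hv0
  set vals := PySem.List.sorted vals0 (fun v => v) false with hv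
  -- A side: loop over prefix ++ zero padding; zeros are filtered away
  have hA : failInRowLoopV (rw.take 9 ++ List.replicate (9 - rw.length) 0) [] = false
      ↔ vals0.Nodup := by
    have := loopV_false_iff (rw.take 9 ++ List.replicate (9 - rw.length) 0) [] (by simp)
    rw [this]
    simp [hv0, slice9, List.filter_append, List.filter_replicate]
  -- B side: adjacent-equal in the sorted list iff not Nodup
  have hperm : vals.Perm vals0 := PySem.List.sorted_perm vals0 (fun v => v) false
  have hpw : vals.Pairwise (· ≤ ·) := by
    have := PySem.List.sorted_pairwise vals0 (fun v => v)
    simpa [hv] using this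
  have hB : ((vals.zip (PySem.List.slice vals (some 1) none)).any (fun p => p.1 == p.2)) = true
      ↔ ¬ vals0.Nodup := by
    rw [PySem.List.slice_from_one]
    rw [adj_any_sorted vals hpw, hperm.nodup_iff]
  rcases hb : (vals.zip (PySem.List.slice vals (some 1) none)).any (fun p => p.1 == p.2) with _ | _
  · have hnd : vals0.Nodup := by
      by_contra hc
      exact absurd (hB.mpr hc) (by simp [hb])
    exact hA.mpr hnd
  · have hnd : ¬ vals0.Nodup := hB.mp hb
    rcases ha : failInRowLoopV (rw.take 9 ++ List.replicate (9 - rw.length) 0) [] with _ | _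
    · exact absurd (hA.mp ha) hnd
    · rfl

-- ===== VERDICT (by name: the statement is the Claim_ definition above) =====
theorem fail_in_row_spec : Claim_equal_fail_in_row := by
  intro row sudoku _ _
  unfold Spec_fail_in_row
  exact ports_agree row sudoku
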